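-- pv_equiv track=rewrite | github.com/sumeyaali/Code_Challenges | Intro/digitDegree.py | digitDegree
-- ===== SOURCE A (Python) =====
-- def digitDegree(n):
--     count = 0
--     while True:
--         if n >= 10:
--             # for i in str(n):
--             n = sum([int(i) for i in str(n)])
--             count += 1
--         else:
--             return count
-- ===== SOURCE B (Python) =====
-- def digitDegree(n):
--     if n < 10:
--         return 0
--     s = 0
--     m = n
--     while m > 0:
--         s += m % 10
--         m //= 10
--     return 1 + digitDegree(s)
-- ===== Notes on version B (the rewrite author's own statement) =====
-- stated objective: alternative
-- what changed: Replaced the while-True loop with a counter and str()-based digit extraction by a recursive formulation whose digit sum is computed arithmetically with modulo and integer division, avoiding string conversion entirely.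
import Mathlib
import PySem

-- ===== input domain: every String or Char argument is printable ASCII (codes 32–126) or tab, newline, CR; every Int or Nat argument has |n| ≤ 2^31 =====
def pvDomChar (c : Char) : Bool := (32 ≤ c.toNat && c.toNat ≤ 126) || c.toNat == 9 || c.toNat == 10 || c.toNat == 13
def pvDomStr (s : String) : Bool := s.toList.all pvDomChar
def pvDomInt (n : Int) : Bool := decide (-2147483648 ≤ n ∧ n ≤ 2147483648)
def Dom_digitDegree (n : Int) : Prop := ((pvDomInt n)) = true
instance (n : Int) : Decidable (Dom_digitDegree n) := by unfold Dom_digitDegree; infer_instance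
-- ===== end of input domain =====

-- B replaces A's while-True loop with str()-based digit sums by a recursive formulation with an arithmetic (%10, //10) digit sum; same behaviour, same cost.


-- ===== PORT A =====
-- sum([int(i) for i in str(n)]): str(n) is PySem.Int.toChars; this is only evaluated when
-- n >= 10, where every character of str(n) is a decimal digit c, and Python's int(c) is
-- exactly (c.toNat : Int) - 48 there (exact on this domain).
def pyDigitSum (n : Int) : Int :=
  ((PySem.Int.toChars n).map (fun c => ((c.toNat : Int) - 48))).sum

-- reference digit-sum used only to prove the loops decrease
def digitNatSum (n : Nat) : Nat :=
  if h : n < 10 then n else n % 10 + digitNatSum (n / 10)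
decreasing_by exact Nat.div_lt_self (by omega) (by omega)

theorem digitNatSum_le (n : Nat) : digitNatSum n ≤ n := by
  rw [digitNatSum]
  split_ifs with h
  · exact le_rfl
  · have ih := digitNatSum_le (n / 10)
    omega
decreasing_by exact Nat.div_lt_self (by omega) (by omega)

theorem toDigitsCore_sum (f : Nat) : ∀ (n : Nat) (l : List Char), n < f →
    ((Nat.toDigitsCore 10 f n l).map (fun c => ((c.toNat : Int) - 48))).sum
      = (digitNatSum n : Int) + ((l.map (fun c => ((c.toNat : Int) - 48))).sum) := by
  induction f with
  | zero => intro n l h; omega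
  | succ f ih =>
    intro n l h
    rw [Nat.toDigitsCore]
    by_cases h10 : n / 10 = 0
    · have hn : n < 10 := by omega
      rw [if_pos h10]
      simp only [List.map_cons, List.sum_cons]
      rw [digitNatSum, dif_pos hn]
      have hm : n % 10 = n := Nat.mod_eq_of_lt hn
      have : ((Nat.digitChar (n % 10)).toNat : Int) - 48 = (n : Int) := by
        rw [hm]; interval_cases n <;> rfl
      rw [this]
    · rw [if_neg h10]
      have hn : ¬ n < 10 := by omega
      have hlt : n / 10 < f := by
        have := Nat.div_lt_self (by omega : 0 < n) (by omega : 1 < 10)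
        omega
      rw [ih (n / 10) _ hlt]
      conv_rhs => rw [digitNatSum]
      rw [dif_neg hn]
      simp only [List.map_cons, List.sum_cons]
      have hd : n % 10 < 10 := Nat.mod_lt _ (by omega)
      have : ((Nat.digitChar (n % 10)).toNat : Int) - 48 = ((n % 10 : Nat) : Int) := by
        interval_cases h : (n % 10) <;> rfl
      rw [this]
      push_cast
      ring

theorem pyDigitSum_eq {n : Int} (h : 10 ≤ n) : pyDigitSum n = (digitNatSum n.toNat : Int) := by
  unfold pyDigitSum PySem.Int.toChars
  rw [if_neg (by omega)]
  unfold Nat.toDigits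
  rw [toDigitsCore_sum (n.toNat + 1) n.toNat [] (by omega)]
  simp

theorem pyDigitSum_lt {n : Int} (h : 10 ≤ n) : pyDigitSum n < n ∧ 0 ≤ pyDigitSum n := by
  rw [pyDigitSum_eq h]
  have h1 : digitNatSum n.toNat ≤ n.toNat := digitNatSum_le n.toNat
  have h2 : digitNatSum n.toNat < n.toNat := by
    rw [digitNatSum, dif_neg (by omega : ¬ n.toNat < 10)]
    have h3 := digitNatSum_le (n.toNat / 10)
    omega
  omega

theorem pyDigitSum_toNat_lt {n : Int} (h : 10 ≤ n) : (pyDigitSum n).toNat < n.toNat := by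
  have := pyDigitSum_lt h
  omega

-- the while-True loop of A, with its running counter
def digitDegreeLoop (n : Int) (count : Int) : Int :=
  if h : 10 ≤ n then digitDegreeLoop (pyDigitSum n) (count + 1) else count
termination_by n.toNat
decreasing_by exact pyDigitSum_toNat_lt h

def digitDegree (n : Int) : Int := digitDegreeLoop n 0

-- ===== PORT B =====
-- the 'while m > 0: s += m % 10; m //= 10' loop of B (Python // and % via PySem.Int)
def arithSumLoop (m s : Int) : Int :=
  if h : 0 < m then
    arithSumLoop (PySem.Int.floordiv m 10) (s + PySem.Int.mod m 10)
  else s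
termination_by m.toNat
decreasing_by
  rw [PySem.Int.floordiv_eq_ediv_of_pos (by omega)]
  omega

-- B's arithmetic digit sum equals the reference digit sum (needed for B's termination)
theorem arithSumLoop_eq (m : Int) (hm : 0 ≤ m) (s : Int) :
    arithSumLoop m s = s + (digitNatSum m.toNat : Int) := by
  rw [arithSumLoop]
  by_cases h : 0 < m
  · rw [dif_pos h]
    have hdiv : PySem.Int.floordiv m 10 = m / 10 :=
      PySem.Int.floordiv_eq_ediv_of_pos (by omega)
    have hmod : PySem.Int.mod m 10 = m % 10 :=
      PySem.Int.mod_eq_emod_of_pos (by omega)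
    rw [hdiv, hmod, arithSumLoop_eq (m / 10) (by omega)]
    have hstep : (digitNatSum m.toNat : Int)
        = (m.toNat % 10 : Nat) + (digitNatSum (m.toNat / 10) : Int) := by
      conv_lhs => rw [digitNatSum]
      split_ifs with h10
      · have : m.toNat / 10 = 0 := by omega
        rw [this, Nat.mod_eq_of_lt h10]
        rw [digitNatSum]
        simp
      · push_cast; ring
    rw [hstep]
    have h1 : (m / 10).toNat = m.toNat / 10 := by omega
    have h2 : m % 10 = ((m.toNat % 10 : Nat) : Int) := by omega
    rw [h1, h2]
    ring
  · rw [dif_neg h]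
    have : m = 0 := by omega
    subst this
    rw [show ((0:Int)).toNat = 0 from rfl, digitNatSum]
    simp
termination_by m.toNat
decreasing_by rw [PySem.Int.floordiv_eq_ediv_of_pos (by omega)] at *; omega

theorem arithSum_toNat_lt {n : Int} (h : 10 ≤ n) : (arithSumLoop n 0).toNat < n.toNat := by
  rw [arithSumLoop_eq n (by omega)]
  have h1 : digitNatSum n.toNat ≤ n.toNat := digitNatSum_le n.toNat
  have h2 : digitNatSum n.toNat < n.toNat := by
    rw [digitNatSum, dif_neg (by omega : ¬ n.toNat < 10)]
    have h3 := digitNatSum_le (n.toNat / 10)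
    omega
  omega

def digitDegree_alt (n : Int) : Int :=
  if h : n < 10 then 0
  else 1 + digitDegree_alt (arithSumLoop n 0)
termination_by n.toNat
decreasing_by exact arithSum_toNat_lt (by omega)

-- ===== PRECONDITION & SPEC =====
def Spec_digitDegree (n : Int) (out : Int) : Prop := out = digitDegree_alt n
instance (n : Int) (out : Int) : Decidable (Spec_digitDegree n out) := by unfold Spec_digitDegree; infer_instance

-- ===== CLAIM =====
def Claim_equal_digitDegree : Prop := ∀ (n : Int), Dom_digitDegree n → Spec_digitDegree n (digitDegree n)

-- ===== LEMMAS AND PROOFS =====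
theorem sums_agree {n : Int} (h : 10 ≤ n) : pyDigitSum n = arithSumLoop n 0 := by
  rw [pyDigitSum_eq h, arithSumLoop_eq n (by omega)]
  ring

theorem loop_eq_alt (n count : Int) : digitDegreeLoop n count = count + digitDegree_alt n := by
  rw [digitDegreeLoop, digitDegree_alt]
  by_cases h : 10 ≤ n
  · rw [dif_pos h, dif_neg (by omega : ¬ n < 10)]
    rw [loop_eq_alt (pyDigitSum n) (count + 1), sums_agree h]
    ring
  · rw [dif_neg h, dif_pos (by omega : n < 10)]
    ring
termination_by n.toNat
decreasing_by exact pyDigitSum_toNat_lt h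

-- ===== VERDICT =====
theorem digitDegree_spec : Claim_equal_digitDegree := by
  intro n _
  unfold Spec_digitDegree digitDegree
  rw [loop_eq_alt]
  ring
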